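-- pv_equiv track=rewrite | github.com/ragilhadi/echo | modules/frontend/managers/message_manager.py | _group_conversation_pairs
-- ===== SOURCE A (Python) =====
-- from typing import List, Dict, Tuple
--
-- def _group_conversation_pairs(
--     messages: List[Dict[str, str]]
-- ) -> List[List[Dict[str, str]]]:
--     """Group conversation messages into user-assistant pairs.
--
--     Args:
--         messages (List[Dict[str, str]]): Conversation messages (no system).
--
--     Returns:
--         List[List[Dict[str, str]]]: Grouped message pairs.
--     """
--     pairs = []
--     i = 0
--
--     while i < len(messages):
--         current_msg = messages[i]
--
--         if current_msg["role"] == "user":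
--             # Start a new pair with user message
--             pair = [current_msg]
--
--             # Look for the next assistant message
--             if i + 1 < len(messages) and messages[i + 1]["role"] == "assistant":
--                 pair.append(messages[i + 1])
--                 i += 2
--             else:
--                 # User message without assistant response
--                 i += 1
--
--             pairs.append(pair)
--         else:
--             # Skip standalone assistant messages (shouldn't happen in normal flow)
--             i += 1
--
--     return pairs
-- ===== SOURCE B (Python) =====
-- from typing import List, Dict
--
-- def _group_conversation_pairs(
--     messages: List[Dict[str, str]]
-- ) -> List[List[Dict[str, str]]]:
--     """Single forward sweep with a 'pending unpaired user' flag instead of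
--     an index loop with lookahead."""
--     pairs = []
--     prev_unpaired_user = False
--     for msg in messages:
--         if prev_unpaired_user and msg["role"] == "assistant":
--             pairs[-1].append(msg)
--             prev_unpaired_user = False
--             continue
--         prev_unpaired_user = False
--         if msg["role"] == "user":
--             pairs.append([msg])
--             prev_unpaired_user = True
--     return pairs
-- ===== Notes on version B (the rewrite author's own statement) =====
-- stated objective: simpler
-- what changed: Replaced the index-based while loop with messages[i+1] lookahead and variable step (i+=1/i+=2) by a single for-loop state machine carrying a 'previous message is an unpaired user' flag that attaches an assistant message to the last pair.
-- outside the precondition, e.g. on _group_conversation_pairs([{'content': 'x'}]): A raises KeyError, B raises KeyError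
import Mathlib
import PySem

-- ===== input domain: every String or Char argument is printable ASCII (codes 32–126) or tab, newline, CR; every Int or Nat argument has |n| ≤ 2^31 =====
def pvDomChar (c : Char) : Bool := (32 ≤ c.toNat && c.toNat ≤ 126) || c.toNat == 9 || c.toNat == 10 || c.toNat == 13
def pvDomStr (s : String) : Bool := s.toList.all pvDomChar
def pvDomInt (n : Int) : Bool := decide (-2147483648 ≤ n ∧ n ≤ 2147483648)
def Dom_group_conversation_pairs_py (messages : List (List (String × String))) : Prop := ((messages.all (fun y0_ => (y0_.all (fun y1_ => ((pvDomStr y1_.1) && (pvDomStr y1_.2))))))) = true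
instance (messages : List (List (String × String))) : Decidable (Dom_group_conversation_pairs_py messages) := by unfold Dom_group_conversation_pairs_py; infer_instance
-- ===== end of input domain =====

-- B replaces A's index loop with lookahead by a single state-machine sweep carrying a
-- 'previous message is an unpaired user message' flag (objective: simpler decomposition).

-- ===== PORT A =====
-- msg["role"]: first match in the association list; exact whenever the key is present
-- (Pre_ guarantees it; Python raises KeyError otherwise).
def pvRole (m : List (String × String)) : String :=
  (((m.find? (fun kv => kv.1 == "role")).map Prod.snd).getD "")

-- the while-loop of A: index i, accumulator pairs
def gA_go (messages : List (List (String × String))) (i : Nat)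
    (pairs : List (List (List (String × String)))) : List (List (List (String × String))) :=
  if h : i < messages.length then
    let current_msg := messages[i]
    if pvRole current_msg == "user" then
      if h2 : i + 1 < messages.length then
        if pvRole messages[i+1] == "assistant" then
          gA_go messages (i + 2) (pairs ++ [[current_msg, messages[i+1]]])
        else
          gA_go messages (i + 1) (pairs ++ [[current_msg]])
      else
        gA_go messages (i + 1) (pairs ++ [[current_msg]])
    else
      gA_go messages (i + 1) pairs
  else
    pairs
termination_by messages.length - i

def group_conversation_pairs_py (messages : List (List (String × String))) : List (List (List (String × String))) :=
  gA_go messages 0 []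

-- ===== PORT B =====
-- one step of Source B's for-loop; state = (pairs, prev_unpaired_user)
def gB_step (st : List (List (List (String × String))) × Bool)
    (msg : List (String × String)) : List (List (List (String × String))) × Bool :=
  if st.2 && (pvRole msg == "assistant") then
    -- pairs[-1].append(msg)  (the flag guarantees pairs is nonempty in Python)
    (st.1.dropLast ++ [(st.1.getLastD []) ++ [msg]], false)
  else if pvRole msg == "user" then
    (st.1 ++ [[msg]], true)
  else
    (st.1, false)

def group_conversation_pairs_py_alt (messages : List (List (String × String))) : List (List (List (String × String))) :=
  (messages.foldl gB_step ([], false)).1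

-- ===== PRECONDITION & SPEC =====
-- Pre_ excludes exactly the inputs where some message lacks a "role" key: there Python A
-- (and Python B) raise KeyError.
def Pre_group_conversation_pairs_py (messages : List (List (String × String))) : Prop :=
  ∀ m ∈ messages, (m.any (fun kv => kv.1 == "role")) = true
instance (messages : List (List (String × String))) : Decidable (Pre_group_conversation_pairs_py messages) := by unfold Pre_group_conversation_pairs_py; infer_instance

def pvWitness_group_conversation_pairs_py : (List (List (String × String))) :=
  [[("role", "user"), ("content", "hi")], [("role", "assistant"), ("content", "hello")], [("role", "user"), ("content", "bye")]]

def Spec_group_conversation_pairs_py (messages : List (List (String × String))) (out : List (List (List (String × String)))) : Prop := out = group_conversation_pairs_py_alt messages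
instance (messages : List (List (String × String))) (out : List (List (List (String × String)))) : Decidable (Spec_group_conversation_pairs_py messages out) := by unfold Spec_group_conversation_pairs_py; infer_instance

-- ===== CLAIM (what is proved, stated in full; the proofs are below) =====
def Claim_equal_group_conversation_pairs_py : Prop := ∀ (messages : List (List (String × String))), Dom_group_conversation_pairs_py messages → Pre_group_conversation_pairs_py messages → Spec_group_conversation_pairs_py messages (group_conversation_pairs_py messages)

-- ===== LEMMAS AND PROOFS =====

-- reference shape of the grouping, used as the middle term of the proof
def gSpec : List (List (String × String)) → List (List (List (String × String)))
  | [] => []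
  | m :: rest =>
    if pvRole m == "user" then
      match rest with
      | [] => [[m]]
      | a :: rest' =>
        if pvRole a == "assistant" then [m, a] :: gSpec rest'
        else [m] :: gSpec (a :: rest')
    else gSpec rest

-- skipping a non-user message leaves the grouping unchanged
theorem gSpec_cons_not_user (m : List (String × String)) (rest : List (List (String × String)))
    (h : ¬ (pvRole m == "user") = true) : gSpec (m :: rest) = gSpec rest := by
  cases rest <;> simp [gSpec, h]

-- A's loop over suffix `drop i` computes `pairs ++ gSpec (drop i)`
theorem gA_go_eq_aux (messages : List (List (String × String))) :
    ∀ n i pairs, messages.length - i ≤ n →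
      gA_go messages i pairs = pairs ++ gSpec (messages.drop i) := by
  intro n
  induction n with
  | zero =>
    intro i pairs hn
    have h : ¬ i < messages.length := by omega
    rw [gA_go]
    simp [h, List.drop_eq_nil_of_le (Nat.le_of_not_lt h), gSpec]
  | succ n ih =>
    intro i pairs hn
    rw [gA_go]
    by_cases h : i < messages.length
    · have hdrop : messages.drop i = messages[i] :: messages.drop (i+1) :=
        List.drop_eq_getElem_cons h
      simp only [h, dif_pos]
      by_cases hu : pvRole messages[i] == "user"
      · simp only [hu, if_pos]
        by_cases h2 : i + 1 < messages.length
        · have hdrop2 : messages.drop (i+1) = messages[i+1] :: messages.drop (i+2) :=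
            List.drop_eq_getElem_cons h2
          simp only [h2, dif_pos]
          by_cases ha : pvRole messages[i+1] == "assistant"
          · rw [if_pos ha, ih (i+2) _ (by omega), hdrop, hdrop2]
            simp [gSpec, hu, ha]
          · rw [if_neg ha, ih (i+1) _ (by omega), hdrop]
            conv_rhs => rw [hdrop2]
            simp [gSpec, hu, ha, ← hdrop2]
        · have hdrop2 : messages.drop (i+1) = [] :=
            List.drop_eq_nil_of_le (by omega)
          simp only [h2, dif_neg, not_false_iff]
          rw [ih (i+1) _ (by omega), hdrop, hdrop2]
          simp [gSpec, hu]
      · simp only [hu, if_neg, Bool.not_eq_true]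
        rw [ih (i+1) _ (by omega), hdrop, gSpec_cons_not_user _ _ hu]
    · simp [h, List.drop_eq_nil_of_le (Nat.le_of_not_lt h), gSpec]

theorem gA_go_eq (messages : List (List (String × String))) :
    ∀ i pairs, gA_go messages i pairs = pairs ++ gSpec (messages.drop i) := by
  intro i pairs
  exact gA_go_eq_aux messages (messages.length - i) i pairs le_rfl

-- B's fold invariant, both flag states at once
theorem gB_inv :
    ∀ l : List (List (String × String)),
      (∀ pairs, (List.foldl gB_step (pairs, false) l).1 = pairs ++ gSpec l) ∧
      (∀ pairs u, pvRole u == "user" →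
        (List.foldl gB_step (pairs ++ [[u]], true) l).1 = pairs ++ gSpec (u :: l)) := by
  intro l
  induction l with
  | nil =>
    constructor
    · intro pairs; simp [gSpec]
    · intro pairs u hu; simp [gSpec, hu]
  | cons m rest ih =>
    constructor
    · intro pairs
      simp only [List.foldl_cons]
      by_cases hu : pvRole m == "user"
      · have hstep : gB_step (pairs, false) m = (pairs ++ [[m]], true) := by
          simp [gB_step, hu]
        rw [hstep, ih.2 pairs m hu]
      · by_cases hm : pvRole m == "assistant"
        · have hstep : gB_step (pairs, false) m = (pairs, false) := by
            simp [gB_step, hu]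
          rw [hstep, ih.1 pairs, gSpec_cons_not_user _ _ hu]
        · have hstep : gB_step (pairs, false) m = (pairs, false) := by
            simp [gB_step, hu]
          rw [hstep, ih.1 pairs, gSpec_cons_not_user _ _ hu]
    · intro pairs u hu
      simp only [List.foldl_cons]
      by_cases ha : pvRole m == "assistant"
      · have hstep : gB_step (pairs ++ [[u]], true) m = (pairs ++ [[u, m]], false) := by
          simp [gB_step, ha]
        rw [hstep, ih.1]
        simp [gSpec, hu, ha]
      · by_cases hm : pvRole m == "user"
        · have hstep : gB_step (pairs ++ [[u]], true) m = ((pairs ++ [[u]]) ++ [[m]], true) := by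
            simp [gB_step, ha, hm]
          rw [hstep, ih.2 (pairs ++ [[u]]) m hm]
          simp [gSpec, hu, ha]
        · have hstep : gB_step (pairs ++ [[u]], true) m = (pairs ++ [[u]], false) := by
            simp [gB_step, ha, hm]
          rw [hstep, ih.1]
          have : gSpec (u :: m :: rest) = [u] :: gSpec (m :: rest) := by
            simp [gSpec, hu, ha]
          rw [this, gSpec_cons_not_user _ _ hm]
          simp

-- ===== VERDICT (by name: the statement is the Claim_ definition above) =====
theorem group_conversation_pairs_py_spec : Claim_equal_group_conversation_pairs_py := by
  intro messages _ _
  unfold Spec_group_conversation_pairs_py group_conversation_pairs_py group_conversation_pairs_py_alt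
  rw [gA_go_eq, (gB_inv messages).1]
  simp
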